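-- pv_equiv track=rewrite | github.com/JackInTaiwan/buti-recorder | butirecorder/recorder.py | check_step_duplicate
-- ===== SOURCE A (Python) =====
-- def check_step_duplicate(step, list) :
--     step_list = [pair[0] for pair in list]
--     if step in step_list :
--         if len(step_list) > 1 and step_list.index(step) != len(step_list) -1 :
--             raise ValueError("Method checkpoint requires no duplicate step as checkpoint.")
--         else :
--             return True
--
--     else :
--         return False
-- ===== SOURCE B (Python) =====
-- def check_step_duplicate(step, list):
--     # single pass: count occurrences of step among first components and
--     # remember whether the most recent (i.e. finally the last) one matches
--     hits = 0
--     last_matches = False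
--     for pair in list:
--         first = pair[0]
--         if first == step:
--             hits += 1
--         last_matches = first == step
--     if hits == 0:
--         return False
--     if hits > 1 or not last_matches:
--         raise ValueError("Method checkpoint requires no duplicate step as checkpoint.")
--     return True
-- ===== Notes on version B (the rewrite author's own statement) =====
-- stated objective: alternative
-- what changed: Replaces A's three passes (list comprehension, membership test, .index position comparison) by one explicit loop accumulating the occurrence count and a last-element flag, deciding by multiplicity (succeed iff step occurs exactly once and at the end) instead of by first-occurrence position.
import Mathlib
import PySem

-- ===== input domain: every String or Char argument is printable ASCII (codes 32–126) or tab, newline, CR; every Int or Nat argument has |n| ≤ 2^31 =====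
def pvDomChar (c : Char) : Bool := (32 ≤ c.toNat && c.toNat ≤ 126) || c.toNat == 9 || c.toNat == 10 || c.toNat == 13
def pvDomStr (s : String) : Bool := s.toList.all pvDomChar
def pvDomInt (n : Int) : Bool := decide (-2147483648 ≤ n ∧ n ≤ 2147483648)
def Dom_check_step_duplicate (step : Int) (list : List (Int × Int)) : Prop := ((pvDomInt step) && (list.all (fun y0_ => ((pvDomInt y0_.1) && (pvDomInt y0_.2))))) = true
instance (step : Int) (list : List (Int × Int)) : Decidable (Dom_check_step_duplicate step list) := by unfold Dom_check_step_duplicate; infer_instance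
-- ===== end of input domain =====

-- B replaces A's comprehension + membership + .index()-position comparison by one pass with a
-- (count, last-element-flag) accumulator, deciding by multiplicity (objective: alternative).
-- Both raise ValueError on the same inputs (excluded by Pre_).


-- ===== PORT A =====
def check_step_duplicate (step : Int) (list : List (Int × Int)) : Bool :=
  let step_list := list.map Prod.fst
  if step_list.contains step then
    if decide (1 < step_list.length) &&
       !(PySem.List.index? step_list step == some (step_list.length - 1)) then
      false  -- 'raise ValueError(...)' in A; excluded by Pre_
    else true
  else false

-- ===== PORT B =====
-- one pass: state = (hits, last_matches)
def check_step_duplicate_alt (step : Int) (list : List (Int × Int)) : Bool :=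
  let st := list.foldl
    (fun (s : Int × Bool) pair =>
      (if pair.1 == step then s.1 + 1 else s.1, pair.1 == step))
    (0, false)
  if st.1 == 0 then false
  else if decide (1 < st.1) || !st.2 then
    false  -- 'raise ValueError(...)' in B; excluded by Pre_
  else true

-- ===== PRECONDITION & SPEC =====
-- Pre_ excludes exactly the inputs on which BOTH Pythons raise ValueError: step occurring among
-- the first components before the last position.
def Pre_check_step_duplicate (step : Int) (list : List (Int × Int)) : Prop :=
  step ∉ (list.map Prod.fst).dropLast
instance (step : Int) (list : List (Int × Int)) : Decidable (Pre_check_step_duplicate step list) := by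
  unfold Pre_check_step_duplicate; infer_instance
def pvWitness_check_step_duplicate : Int × (List (Int × Int)) := (2, [(1, 0), (2, 5)])

def Spec_check_step_duplicate (step : Int) (list : List (Int × Int)) (out : Bool) : Prop := out = check_step_duplicate_alt step list
instance (step : Int) (list : List (Int × Int)) (out : Bool) : Decidable (Spec_check_step_duplicate step list out) := by unfold Spec_check_step_duplicate; infer_instance

-- ===== CLAIM (what is proved, stated in full; the proofs are below) =====
def Claim_equal_check_step_duplicate : Prop := ∀ (step : Int) (list : List (Int × Int)), Dom_check_step_duplicate step list → Pre_check_step_duplicate step list → Spec_check_step_duplicate step list (check_step_duplicate step list)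

-- ===== LEMMAS AND PROOFS =====
-- Over a list of pairs whose first components avoid step, B's fold state stays (0, false).
lemma fold_no_match (step : Int) (xs : List (Int × Int))
    (h : step ∉ xs.map Prod.fst) :
    xs.foldl
      (fun (s : Int × Bool) pair =>
        (if pair.1 == step then s.1 + 1 else s.1, pair.1 == step))
      (0, false) = (0, false) := by
  induction xs with
  | nil => rfl
  | cons p xs ih =>
    simp only [List.map_cons, List.mem_cons, not_or] at h
    simp only [List.foldl_cons]
    have hp : (p.1 == step) = false := by
      simp; exact fun e => h.1 e.symm
    rw [hp]
    simpa using ih h.2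

-- ===== VERDICT (by name: the statement is the Claim_ definition above) =====
theorem check_step_duplicate_spec : Claim_equal_check_step_duplicate := by
  intro step list _ hpre
  unfold Spec_check_step_duplicate check_step_duplicate check_step_duplicate_alt
  unfold Pre_check_step_duplicate at hpre
  rcases list.eq_nil_or_concat with rfl | ⟨xs, x, rfl⟩
  · simp
  · simp only [List.concat_eq_append, List.map_append, List.map_cons, List.map_nil] at hpre ⊢
    rw [List.dropLast_concat] at hpre
    have hxs : step ∉ xs.map Prod.fst := hpre
    have hxs' : step ∉ List.map Prod.fst xs := hxs
    simp only [List.foldl_append, List.foldl_cons, List.foldl_nil]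
    rw [fold_no_match step xs hxs]
    by_cases hx : x.1 = step
    · -- last first-component equals step: both return true
      rw [hx]
      rw [PySem.List.index?_append_singleton_self (c := step) (l := List.map Prod.fst xs) hxs']
      simp [List.contains_eq_mem, hxs']
    · -- step absent entirely: both return false
      have hx' : step ≠ x.1 := fun e => hx e.symm
      simp [List.contains_eq_mem, hxs', hx, hx']
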